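-- pv_equiv track=rewrite | github.com/dabbler0/sing-together-again-rewrite | backend/encoding.py | consume_int
-- ===== SOURCE A (Python) =====
-- def consume_int(index, bstring):
--     result = 0
--     factor = 1
--     while bstring[index] != 0:
--         result += bstring[index] * factor
--         factor *= 256
--         index += 1
--     return index + 1, result
-- ===== SOURCE B (Python) =====
-- def consume_int(index, bstring):
--     # Phase 1: find the zero terminator with a non-accumulating scan
--     # (same indexing as A, so it raises IndexError in the same places).
--     end = index
--     while bstring[end] != 0:
--         end += 1
--     # Phase 2: Horner evaluation back-to-front over the consumed digits.
--     result = 0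
--     for j in reversed(range(index, end)):
--         result = result * 256 + bstring[j]
--     return end + 1, result
-- ===== Notes on version B (the rewrite author's own statement) =====
-- stated objective: alternative
-- what changed: Replaces A's single accumulating pass carrying a running factor with a two-phase decomposition: a non-accumulating scan that locates the zero terminator, then a back-to-front Horner evaluation (result = result*256 + digit) over the consumed digits.
import Mathlib
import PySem

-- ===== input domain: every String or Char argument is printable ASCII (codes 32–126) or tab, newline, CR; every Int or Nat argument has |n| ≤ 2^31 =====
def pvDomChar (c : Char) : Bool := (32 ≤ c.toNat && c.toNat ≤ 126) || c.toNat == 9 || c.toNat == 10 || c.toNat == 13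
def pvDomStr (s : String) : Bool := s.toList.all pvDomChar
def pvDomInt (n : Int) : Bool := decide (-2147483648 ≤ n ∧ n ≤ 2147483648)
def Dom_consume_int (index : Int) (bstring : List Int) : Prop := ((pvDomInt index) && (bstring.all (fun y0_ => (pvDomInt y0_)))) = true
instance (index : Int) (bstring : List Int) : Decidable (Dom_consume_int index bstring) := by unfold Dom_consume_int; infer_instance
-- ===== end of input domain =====

-- B replaces A's accumulating pass (running factor) by a find-the-terminator scan followed by
-- a back-to-front Horner evaluation of the digits; equal return values, no speed claim.

-- ===== PORT A =====
-- while bstring[index] != 0: result += bstring[index]*factor; factor *= 256; index += 1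
-- fuel 2*len+1 bounds the number of iterations of any terminating run (a negative start wraps
-- at most once); (0,0) on fuel exhaustion / IndexError is junk outside Pre_.
def consume_intAux (fuel : Nat) (bstring : List Int) (index result factor : Int) : Int × Int :=
  match fuel with
  | 0 => (0, 0)
  | Nat.succ f =>
    match PySem.List.pyGet? bstring index with
    | none => (0, 0)
    | some b =>
      if b ≠ 0 then consume_intAux f bstring (index + 1) (result + b * factor) (factor * 256)
      else (index + 1, result)

def consume_int (index : Int) (bstring : List Int) : Int × Int :=
  consume_intAux (2 * bstring.length + 1) bstring index 0 1

-- ===== PORT B =====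
-- phase 1 of Source B: end = index; while bstring[end] != 0: end += 1   (none = IndexError / no fuel)
def findEnd (fuel : Nat) (bstring : List Int) (e : Int) : Option Int :=
  match fuel with
  | 0 => none
  | Nat.succ f =>
    match PySem.List.pyGet? bstring e with
    | none => none
    | some b => if b ≠ 0 then findEnd f bstring (e + 1) else some e

-- phase 2 of Source B: for j in reversed(range(index, end)): result = result*256 + bstring[j]
def consume_int_alt (index : Int) (bstring : List Int) : Int × Int :=
  match findEnd (2 * bstring.length + 1) bstring index with
  | none => (0, 0)
  | some e =>
    (e + 1,
     ((PySem.List.pyRange index e 1).reverse).foldl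
       (fun r j => r * 256 + PySem.List.pyGetD bstring j 0) 0)

-- ===== PRECONDITION & SPEC =====
-- Pre_ = exactly the inputs on which Python's A returns (the loop meets a zero terminator
-- before running off the end): for a nonnegative start, a zero at or after it; for a negative
-- in-range start (Python indexing wraps), any zero in the list.
def Pre_consume_int (index : Int) (bstring : List Int) : Prop :=
  (0 ≤ index ∧ (0 : Int) ∈ bstring.drop index.toNat) ∨
  (-(bstring.length : Int) ≤ index ∧ index < 0 ∧ (0 : Int) ∈ bstring)
instance (index : Int) (bstring : List Int) : Decidable (Pre_consume_int index bstring) := by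
  unfold Pre_consume_int; infer_instance

def pvWitness_consume_int : Int × List Int := (0, [3, 1, 0])

def Spec_consume_int (index : Int) (bstring : List Int) (out : Int × Int) : Prop := out = consume_int_alt index bstring
instance (index : Int) (bstring : List Int) (out : Int × Int) : Decidable (Spec_consume_int index bstring out) := by unfold Spec_consume_int; infer_instance

-- ===== CLAIM (what is proved, stated in full; the proofs are below) =====
def Claim_equal_consume_int : Prop := ∀ (index : Int) (bstring : List Int), Dom_consume_int index bstring → Pre_consume_int index bstring → Spec_consume_int index bstring (consume_int index bstring)

-- ===== LEMMAS AND PROOFS =====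

-- the Horner value of the digits bstring[i:e], least significant first
def pvHorner (bstring : List Int) (i e : Int) : Int :=
  ((PySem.List.pyRange i e 1).reverse).foldl
    (fun r j => r * 256 + PySem.List.pyGetD bstring j 0) 0

theorem findEnd_le (f : Nat) (b : List Int) : ∀ (s e : Int), findEnd f b s = some e → s ≤ e := by
  induction f with
  | zero => intro s e h; simp [findEnd] at h
  | succ f ih =>
    intro s e h
    simp only [findEnd] at h
    cases hg : PySem.List.pyGet? b s with
    | none => rw [hg] at h; simp at h
    | some v =>
      rw [hg] at h
      by_cases hv : v = 0
      · simp [hv] at h; omega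
      · simp [hv] at h; have := ih (s + 1) e h; omega

theorem pvHorner_self (b : List Int) (i : Int) : pvHorner b i i = 0 := by
  simp [pvHorner, PySem.List.pyRange_one_eq_nil (le_refl i)]

theorem pvHorner_step (b : List Int) (i e v : Int) (hv : PySem.List.pyGet? b i = some v)
    (hle : i + 1 ≤ e) : pvHorner b i e = 256 * pvHorner b (i + 1) e + v := by
  have hcons := PySem.List.pyRange_one_cons (a := i) (b := e) (by omega)
  have hd : PySem.List.pyGetD b i 0 = v := by
    simp [PySem.List.pyGetD, hv]
  simp [pvHorner, hcons, List.foldl_append, hd]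
  ring

theorem aux_eq (f : Nat) (b : List Int) : ∀ (i res fac : Int),
    consume_intAux f b i res fac =
      (match findEnd f b i with
       | none => (0, 0)
       | some e => (e + 1, res + fac * pvHorner b i e)) := by
  induction f with
  | zero => intro i res fac; simp [consume_intAux, findEnd]
  | succ f ih =>
    intro i res fac
    simp only [consume_intAux, findEnd]
    cases hg : PySem.List.pyGet? b i with
    | none => simp
    | some v =>
      by_cases hv : v = 0
      · subst hv
        simp [pvHorner_self]
      · simp only [hv, if_pos, ne_eq, not_false_eq_true]
        rw [ih]
        cases hE : findEnd f b (i + 1) with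
        | none => simp
        | some e =>
          have hle := findEnd_le f b (i + 1) e hE
          simp only []
          rw [pvHorner_step b i e v hg hle]
          congr 1
          ring

-- ===== VERDICT (by name: the statement is the Claim_ definition above) =====
theorem consume_int_spec : Claim_equal_consume_int := by
  intro index bstring _ _
  unfold Spec_consume_int consume_int consume_int_alt
  rw [aux_eq]
  cases hE : findEnd (2 * bstring.length + 1) bstring index with
  | none => simp
  | some e => simp [pvHorner]
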